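-- pv_equiv track=rewrite | github.com/owais-ch/Arrays | Alternate Sorting.py | alternateSort
-- ===== SOURCE A (Python) =====
-- def alternateSort(arr):
--     n=len(arr)
--
--     arr.sort()
--
--     list1=[]
--
--     i,j=0,n-1
--
--     while i<j:
--         list1.append(arr[j])
--         list1.append(arr[i])
--         i+=1
--         j-=1
--     if n%2!=0:
--         list1.append(arr[i])
--     return list1
-- ===== SOURCE B (Python) =====
-- def alternateSort(arr):
--     arr.sort()
--     n = len(arr)
--     res = [0] * n
--     for k, v in enumerate(arr):
--         if 2 * k + 1 < n:
--             res[2 * k + 1] = v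
--         else:
--             res[2 * (n - 1 - k)] = v
--     return res
-- ===== Notes on version B (the rewrite author's own statement) =====
-- stated objective: alternative
-- what changed: Instead of A's two-pointer loop pulling from both ends, B sorts and then scatters in one pass: it pre-allocates the output and writes each sorted element directly to its final position computed by an index formula (2k+1 for the low half, 2(n-1-k) for the high half).
import Mathlib
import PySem

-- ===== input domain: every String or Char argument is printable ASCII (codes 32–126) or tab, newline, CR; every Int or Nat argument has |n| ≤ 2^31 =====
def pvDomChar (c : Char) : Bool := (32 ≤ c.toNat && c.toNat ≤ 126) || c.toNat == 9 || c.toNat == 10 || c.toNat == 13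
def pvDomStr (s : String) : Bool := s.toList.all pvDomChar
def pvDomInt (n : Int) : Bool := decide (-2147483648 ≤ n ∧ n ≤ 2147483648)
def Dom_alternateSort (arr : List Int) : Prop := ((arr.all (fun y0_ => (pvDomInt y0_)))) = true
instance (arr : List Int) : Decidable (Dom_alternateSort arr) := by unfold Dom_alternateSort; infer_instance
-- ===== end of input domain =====

-- B replaces A's two-pointer interleave-from-both-ends loop with a one-pass scatter: after sorting
-- it writes each element directly to its final position by an index formula into a pre-allocated
-- list; objective: alternative algorithm, same cost. Both A and B sort the argument in place in
-- Python; the equivalence proved here is about the return value.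

-- ===== PORT A =====
-- the while loop: returns (list1, i) since Python's i is live after the loop
def pvLoopA (arr : List Int) (list1 : List Int) (i j : Int) : List Int × Int :=
  if i < j then
    pvLoopA arr (list1 ++ [PySem.List.pyGetD arr j 0, PySem.List.pyGetD arr i 0]) (i + 1) (j - 1)
  else (list1, i)
termination_by (j - i).toNat
decreasing_by omega

def alternateSort (arr : List Int) : List Int :=
  let n : Int := PySem.List.len arr
  let arr := PySem.List.sorted arr (fun x => x) false
  let p := pvLoopA arr [] 0 (n - 1)
  if PySem.Int.mod n 2 ≠ 0 then p.1 ++ [PySem.List.pyGetD arr p.2 0] else p.1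

-- ===== PORT B =====
-- res[q] = v is an in-range assignment in Python (both index formulas land in [0, n)),
-- so pySetD is exact here.
def alternateSort_alt (arr : List Int) : List Int :=
  let s := PySem.List.sorted arr (fun x => x) false
  let n : Int := PySem.List.len s
  (PySem.List.enumerate s).foldl
    (fun res kv =>
      if 2 * kv.1 + 1 < n then PySem.List.pySetD res (2 * kv.1 + 1) kv.2
      else PySem.List.pySetD res (2 * (n - 1 - kv.1)) kv.2)
    (List.replicate s.length 0)

-- ===== PRECONDITION & SPEC =====
def Spec_alternateSort (arr : List Int) (out : List Int) : Prop := out = alternateSort_alt arr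
instance (arr : List Int) (out : List Int) : Decidable (Spec_alternateSort arr out) := by unfold Spec_alternateSort; infer_instance

-- ===== CLAIM (what is proved, stated in full; the proofs are below) =====
def Claim_equal_alternateSort : Prop := ∀ (arr : List Int), Dom_alternateSort arr → Spec_alternateSort arr (alternateSort arr)

-- ===== LEMMAS AND PROOFS =====

-- where the element at sorted index p comes from in the output: pvG n p
def pvG (n p : Nat) : Nat := if p % 2 = 1 then p / 2 else n - 1 - p / 2

lemma pvG_lt (n p : Nat) (hp : p < n) : pvG n p < n := by
  unfold pvG; split <;> omega

-- the common characterisation of both outputs: position p holds s[pvG n p]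
def pvTarget (s : List Int) : List Int :=
  List.ofFn (fun p : Fin s.length => s[pvG s.length p.val]'(pvG_lt _ _ p.isLt))

-- the interleaved pairs A produces, as a list
def pvPairs (s : List Int) : List (Int × Int) :=
  ((s.drop (s.length / 2)).reverse).zip (s.take (s.length / 2))

lemma pvPairs_length (s : List Int) : (pvPairs s).length = s.length / 2 := by
  simp [pvPairs]; omega

lemma pvPairs_getElem (s : List Int) (t : Nat) (ht : t < s.length / 2) :
    (pvPairs s)[t]'(by rw [pvPairs_length]; exact ht) =
      (s[s.length - 1 - t]'(by omega), s[t]'(by omega)) := by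
  have h2 : s.length / 2 ≤ s.length := by omega
  simp only [pvPairs, List.getElem_zip, List.getElem_reverse, List.getElem_take,
    List.getElem_drop, List.length_drop]
  have hidx : s.length / 2 + (s.length - s.length / 2 - 1 - t) = s.length - 1 - t := by omega
  simp only [hidx]

lemma pvLoopA_spec (s : List Int) (t : Nat) (ht : t ≤ s.length / 2) (acc : List Int) :
    pvLoopA s acc (t : Int) ((s.length : Int) - 1 - t) =
      (acc ++ ((pvPairs s).drop t).flatMap (fun p => [p.1, p.2]), ((s.length / 2 : Nat) : Int)) := by
  generalize hk : s.length / 2 - t = k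
  induction k generalizing t acc with
  | zero =>
    have htE : t = s.length / 2 := by omega
    rw [pvLoopA]
    rw [if_neg (by omega)]
    rw [List.drop_eq_nil_of_le (by rw [pvPairs_length]; omega)]
    simp [htE]
  | succ k ih =>
    have htl : t < s.length / 2 := by omega
    rw [pvLoopA]
    rw [if_pos (by omega)]
    have e1 : ((t : Int) + 1) = ((t + 1 : Nat) : Int) := by push_cast; ring
    have e2 : ((s.length : Int) - 1 - t - 1) = ((s.length : Int) - 1 - ((t + 1 : Nat) : Int)) := by
      push_cast; ring
    rw [e1, e2, ih (t + 1) (by omega) _ (by omega)]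
    have hdrop : (pvPairs s).drop t =
        (pvPairs s)[t]'(by rw [pvPairs_length]; exact htl) :: (pvPairs s).drop (t + 1) :=
      List.drop_eq_getElem_cons (by rw [pvPairs_length]; exact htl)
    rw [hdrop, pvPairs_getElem s t htl]
    have hj : PySem.List.pyGetD s ((s.length : Int) - 1 - t) 0 =
        s[s.length - 1 - t]'(by omega) := by
      have ecast : ((s.length : Int) - 1 - t) = ((s.length - 1 - t : Nat) : Int) := by
        omega
      rw [ecast, PySem.List.pyGetD_natCast, List.getD_eq_getElem]
    have hi : PySem.List.pyGetD s (t : Int) 0 = s[t]'(by omega) := by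
      rw [PySem.List.pyGetD_natCast, List.getD_eq_getElem]
    rw [hj, hi]
    simp

lemma pvFlat2_length (l : List (Int × Int)) :
    (l.flatMap fun p => [p.1, p.2]).length = 2 * l.length := by
  induction l with
  | nil => simp
  | cons p l ih => simp [ih]; omega

lemma pvFlat2_getElem (l : List (Int × Int)) (i : Nat) (hi : i < 2 * l.length) :
    (l.flatMap fun p => [p.1, p.2])[i]'(by rw [pvFlat2_length]; exact hi) =
      if i % 2 = 0 then (l[i / 2]'(by omega)).1 else (l[i / 2]'(by omega)).2 := by
  induction l generalizing i with
  | nil => simp at hi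
  | cons p l ih =>
    match i with
    | 0 => simp
    | 1 => simp
    | (k + 2) =>
      have hk : k < 2 * l.length := by simp at hi; omega
      have : (k + 2) / 2 = k / 2 + 1 := by omega
      have hm : (k + 2) % 2 = k % 2 := by omega
      simp only [List.flatMap_cons, List.cons_append, List.getElem_cons_succ, this, hm]
      exact ih k hk

-- A computes pvTarget of the sorted list
lemma pvA_char (arr : List Int) :
    alternateSort arr = pvTarget (PySem.List.sorted arr (fun x => x) false) := by
  unfold alternateSort
  set s := PySem.List.sorted arr (fun x => x) false with hs
  have hlenI : PySem.List.len arr = (s.length : Int) := by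
    rw [PySem.List.len_eq, hs, PySem.List.length_sorted]
  simp only [hlenI]
  have hA := pvLoopA_spec s 0 (by omega) []
  simp only [Nat.cast_zero] at hA
  have e0 : (s.length : Int) - 1 = (s.length : Int) - 1 - (0 : Int) := by ring
  rw [e0, hA]
  simp only [List.drop_zero, List.nil_append]
  have hpl := pvPairs_length s
  have hLlen := pvFlat2_length (pvPairs s)
  have hTlen : (pvTarget s).length = s.length := by simp [pvTarget]
  have hm : PySem.Int.mod ((s.length : Nat) : Int) 2 = ((s.length % 2 : Nat) : Int) := by
    exact_mod_cast PySem.Int.mod_natCast s.length 2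
  have hget : ∀ (i : Nat) (h1 : i < ((pvPairs s).flatMap fun p => [p.1, p.2]).length)
      (h2 : pvG s.length i < s.length),
      ((pvPairs s).flatMap fun p => [p.1, p.2])[i]'h1 = s[pvG s.length i]'h2 := by
    intro i h1 h2
    have hi : i < 2 * (pvPairs s).length := by omega
    refine (pvFlat2_getElem (pvPairs s) i hi).trans ?_
    have hi2 : i / 2 < s.length / 2 := by omega
    have hp := pvPairs_getElem s (i / 2) hi2
    by_cases hpar : i % 2 = 0
    · rw [if_pos hpar]
      have hidx : pvG s.length i = s.length - 1 - i / 2 := by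
        unfold pvG; rw [if_neg (by omega)]
      simp only [hidx]
      exact congrArg Prod.fst hp
    · rw [if_neg hpar]
      have hidx : pvG s.length i = i / 2 := by
        unfold pvG; rw [if_pos (by omega)]
      simp only [hidx]
      exact congrArg Prod.snd hp
  by_cases hodd : s.length % 2 = 1
  · rw [if_pos (by rw [hm, hodd]; decide)]
    apply List.ext_getElem
    · simp only [List.length_append, List.length_cons, List.length_nil, hTlen, hLlen]
      omega
    · intro p hp hp2
      have hp' : p < s.length := by omega
      have hT : (pvTarget s)[p]'hp2 = s[pvG s.length p]'(pvG_lt _ _ hp') := by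
        simp [pvTarget]
      rw [hT]
      by_cases hlt : p < 2 * (s.length / 2)
      · rw [List.getElem_append_left (by omega)]
        exact hget p (by omega) _
      · rw [List.getElem_append_right (by omega)]
        have hz : p - ((pvPairs s).flatMap fun p => [p.1, p.2]).length = 0 := by omega
        simp only [hz, List.getElem_cons_zero]
        have hmid : PySem.List.pyGetD s ((s.length / 2 : Nat) : Int) 0 =
            s[s.length / 2]'(by omega) := by
          rw [PySem.List.pyGetD_natCast, List.getD_eq_getElem]
        rw [hmid]
        have hidx : pvG s.length p = s.length / 2 := by unfold pvG; split <;> omega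
        simp only [hidx]
  · have h0 : s.length % 2 = 0 := by omega
    rw [if_neg (by simp only [ne_eq, not_not, hm, h0, Nat.cast_zero])]
    apply List.ext_getElem
    · rw [hTlen, hLlen]; omega
    · intro p hp hp2
      have hp' : p < s.length := by omega
      have hT : (pvTarget s)[p]'hp2 = s[pvG s.length p]'(pvG_lt _ _ hp') := by
        simp [pvTarget]
      rw [hT]
      exact hget p (by omega) _

-- the position B writes sorted index k to
def pvF (n k : Nat) : Nat := if 2 * k + 1 < n then 2 * k + 1 else 2 * (n - 1 - k)

lemma pvF_lt (n k : Nat) (hk : k < n) : pvF n k < n := by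
  unfold pvF; split <;> omega

lemma pvF_eq_iff (n k p : Nat) (hk : k < n) (hp : p < n) :
    pvF n k = p ↔ pvG n p = k := by
  unfold pvF pvG; split <;> split <;> omega

-- B's scatter loop: positions with pvG in [j, j + t.length) get t[pvG - j], others keep res
lemma pvFoldSpec (n : Nat) (t : List Int) (j : Nat) (res : List Int)
    (hres : res.length = n) (hjt : j + t.length ≤ n) :
    ((PySem.List.enumerate t (j : Int)).foldl
      (fun res kv =>
        if 2 * kv.1 + 1 < (n : Int) then PySem.List.pySetD res (2 * kv.1 + 1) kv.2
        else PySem.List.pySetD res (2 * ((n : Int) - 1 - kv.1)) kv.2) res).length = n ∧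
    ∀ (p : Nat), p < n →
      ((PySem.List.enumerate t (j : Int)).foldl
        (fun res kv =>
          if 2 * kv.1 + 1 < (n : Int) then PySem.List.pySetD res (2 * kv.1 + 1) kv.2
          else PySem.List.pySetD res (2 * ((n : Int) - 1 - kv.1)) kv.2) res)[p]? =
        if h : j ≤ pvG n p ∧ pvG n p < j + t.length then some (t[pvG n p - j]'(by omega))
        else res[p]? := by
  induction t generalizing j res with
  | nil =>
    rw [PySem.List.enumerate_nil]
    simp only [List.foldl_nil, List.length_nil]
    refine ⟨hres, ?_⟩
    intro p hp
    rw [dif_neg (by omega)]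
  | cons x t ih =>
    rw [PySem.List.enumerate_cons]
    simp only [List.foldl_cons]
    have hjn : j < n := by simp at hjt; omega
    have hstep :
        (if 2 * (j : Int) + 1 < (n : Int) then PySem.List.pySetD res (2 * (j : Int) + 1) x
         else PySem.List.pySetD res (2 * ((n : Int) - 1 - (j : Int))) x) =
          res.set (pvF n j) x := by
      unfold pvF
      by_cases hc : 2 * j + 1 < n
      · rw [if_pos (by exact_mod_cast hc), if_pos hc]
        have e : 2 * (j : Int) + 1 = ((2 * j + 1 : Nat) : Int) := by push_cast; ring
        rw [e, PySem.List.pySetD_natCast]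
      · rw [if_neg (by omega), if_neg hc]
        have e : 2 * ((n : Int) - 1 - (j : Int)) = ((2 * (n - 1 - j) : Nat) : Int) := by
          have : (((n : Nat) - 1 - j : Nat) : Int) = (n : Int) - 1 - j := by omega
          push_cast [← this]
          omega
        rw [e, PySem.List.pySetD_natCast]
    rw [hstep]
    have e1 : (j : Int) + 1 = ((j + 1 : Nat) : Int) := by push_cast; ring
    rw [e1]
    have hres' : (res.set (pvF n j) x).length = n := by simp [hres]
    obtain ⟨ihlen, ihget⟩ := ih (j + 1) (res.set (pvF n j) x) hres'
      (by simp at hjt ⊢; omega)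
    refine ⟨ihlen, ?_⟩
    intro p hp
    rw [ihget p hp]
    simp only [List.length_cons]
    by_cases hgj : pvG n p = j
    · have hc1 : ¬(j + 1 ≤ pvG n p ∧ pvG n p < j + 1 + t.length) := by omega
      have hc2 : j ≤ pvG n p ∧ pvG n p < j + (t.length + 1) := by omega
      rw [dif_neg hc1, dif_pos hc2]
      have hfp : pvF n j = p := (pvF_eq_iff n j p hjn hp).mpr hgj
      have hz : pvG n p - j = 0 := by omega
      simp only [hz, List.getElem_cons_zero]
      rw [← hfp]
      exact List.getElem?_set_self (by have := pvF_lt n j hjn; omega)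
    · by_cases hin : j + 1 ≤ pvG n p ∧ pvG n p < j + 1 + t.length
      · have hc2 : j ≤ pvG n p ∧ pvG n p < j + (t.length + 1) := by omega
        rw [dif_pos hin, dif_pos hc2]
        have hsucc : pvG n p - j = (pvG n p - (j + 1)) + 1 := by omega
        simp only [hsucc, List.getElem_cons_succ]
      · have hc2 : ¬(j ≤ pvG n p ∧ pvG n p < j + (t.length + 1)) := by omega
        rw [dif_neg hin, dif_neg hc2]
        exact List.getElem?_set_ne
          (by intro hc; exact hgj ((pvF_eq_iff n j p hjn hp).mp hc))

-- B computes pvTarget of the sorted list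
lemma pvB_char (arr : List Int) :
    alternateSort_alt arr = pvTarget (PySem.List.sorted arr (fun x => x) false) := by
  unfold alternateSort_alt
  set s := PySem.List.sorted arr (fun x => x) false with hs
  have hlenI : PySem.List.len s = ((s.length : Nat) : Int) := by rw [PySem.List.len_eq]
  simp only [hlenI]
  obtain ⟨hlen, hget⟩ := pvFoldSpec s.length s 0 (List.replicate s.length 0)
    (by simp) (by omega)
  simp only [Nat.cast_zero, Nat.zero_add, Nat.sub_zero] at hlen hget
  have hTlen : (pvTarget s).length = s.length := by simp [pvTarget]
  apply List.ext_getElem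
  · rw [hlen, hTlen]
  · intro p hp hp2
    have hp' : p < s.length := by omega
    have hq := hget p hp'
    rw [dif_pos ⟨Nat.zero_le _, pvG_lt s.length p hp'⟩] at hq
    rw [List.getElem?_eq_getElem (by omega)] at hq
    have hT : (pvTarget s)[p]'hp2 = s[pvG s.length p]'(pvG_lt _ _ hp') := by
      simp [pvTarget]
    rw [hT]
    exact Option.some.inj hq

-- ===== VERDICT (by name: the statement is the Claim_ definition above) =====
theorem alternateSort_spec : Claim_equal_alternateSort := by
  intro arr _
  unfold Spec_alternateSort
  rw [pvA_char, pvB_char]
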